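-- pv_equiv track=rewrite | github.com/dpflann/OER | udacity/design_of_computer_programs/final/unit_5-darts_probability.py | name
-- ===== SOURCE A (Python) =====
-- def name(n, i):
--     """Rename a number to a string. Select the 'easiest' target is there are many options.
--
--     60 --> T2 for triple 20
--     S > T > D
--     """
--
--     names = {0: ['OFF'], 25: ['SB'], 50: ['DB']}
--     for _ in range(1, 21):
--         s, d, t = _, _ * 2, _ * 3
--         _s = str(_)
--         if s not in names:
--             names[s] = ['S' + _s]
--         else:
--             names[s] += ['S' + _s]
--         if d not in names:
--             names[d] = ['D' + _s]
--         else: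
--             names[d] += ['D' + _s]
--         if t not in names:
--             names[t] = ['T' + _s]
--         else:
--             names[t] += ['T' + _s]
--     options = names[n]
--     if n == 0:
--         return options[0]
--     if i == 3:
--         # select a double
--         option = [o for o in options if 'D' in o]
--     else:
--         # select the easiest
--         option = [o for o in options if 'S' in o]
--         if not option:
--             option = [o for o in options if 'T' in o]
--         if not option:
--             option = [o for o in options if 'D' in o]
--     return option[0]
-- ===== SOURCE B (Python) =====
-- def name(n, i):
--     """Rename a dart score to its easiest target name (S > T > D),
--     computed directly from n."""
--     if n == 0:
--         return 'OFF'
--     if i == 3: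
--         if n == 50:
--             return 'DB'
--         if n % 2 == 0 and 1 <= n // 2 <= 20:
--             return 'D' + str(n // 2)
--         raise ValueError('no double target for %d' % n)
--     if n == 25:
--         return 'SB'
--     if n == 50:
--         return 'DB'
--     if 1 <= n <= 20:
--         return 'S' + str(n)
--     if n % 3 == 0 and 1 <= n // 3 <= 20:
--         return 'T' + str(n // 3)
--     if n % 2 == 0 and 1 <= n // 2 <= 20:
--         return 'D' + str(n // 2)
--     raise ValueError('no dart target for %d' % n)
-- ===== Notes on version B (the rewrite author's own statement) =====
-- stated objective: simpler
-- what changed: B drops A's 20-iteration table-building loop and dict of option lists and computes the target name by direct case analysis on n (specials, then single/triple/double divisibility tests); Pre_ excludes the inputs on which A raises (unknown n, or i==3 with no double target), where B raises its own ValueError.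
import Mathlib
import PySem

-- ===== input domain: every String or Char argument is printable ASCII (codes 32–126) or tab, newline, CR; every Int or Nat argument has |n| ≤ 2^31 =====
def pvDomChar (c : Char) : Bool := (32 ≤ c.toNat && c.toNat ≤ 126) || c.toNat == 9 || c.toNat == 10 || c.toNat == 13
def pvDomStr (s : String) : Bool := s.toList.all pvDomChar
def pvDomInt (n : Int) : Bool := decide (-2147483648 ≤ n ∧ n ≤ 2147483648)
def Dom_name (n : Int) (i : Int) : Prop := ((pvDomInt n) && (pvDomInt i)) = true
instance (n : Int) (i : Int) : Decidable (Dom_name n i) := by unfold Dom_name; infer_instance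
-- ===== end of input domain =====

-- B replaces A's table-building loop by direct case analysis on n (simpler); both raise outside Pre_.

-- ===== PORT A =====
-- one loop iteration of A's table construction ('if key not in names: names[key]=[v] else: names[key]+=[v]' three times)
def nameStep (d : PySem.Dict Int (List (List Char))) (k : Int) : PySem.Dict Int (List (List Char)) :=
  let s := k
  let dbl := k * 2
  let t := k * 3
  let ks := PySem.Int.toChars k
  let d1 := if ¬ d.contains s then d.insert s [('S' :: ks)] else d.modify s [] (fun l => l ++ [('S' :: ks)])
  let d2 := if ¬ d1.contains dbl then d1.insert dbl [('D' :: ks)] else d1.modify dbl [] (fun l => l ++ [('D' :: ks)])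
  if ¬ d2.contains t then d2.insert t [('T' :: ks)] else d2.modify t [] (fun l => l ++ [('T' :: ks)])

-- strings carried as List Char; 'D' in o (one-char needle) is PySem.Chars.isIn ['D'] o
def name (n : Int) (i : Int) : String :=
  let names := (PySem.List.pyRange 1 21 1).foldl nameStep
    (PySem.Dict.ofList [(0, [['O','F','F']]), (25, [['S','B']]), (50, [['D','B']])])
  let options := (names.get? n).getD []   -- none = KeyError, excluded by Pre_
  if n = 0 then
    String.ofList (PySem.List.pyGetD options 0 [])
  else if i = 3 then
    String.ofList (PySem.List.pyGetD (options.filter (fun o => PySem.Chars.isIn ['D'] o)) 0 [])  -- empty = IndexError, excluded by Pre_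
  else
    let option1 := options.filter (fun o => PySem.Chars.isIn ['S'] o)
    let option2 := if option1.isEmpty then options.filter (fun o => PySem.Chars.isIn ['T'] o) else option1
    let option3 := if option2.isEmpty then options.filter (fun o => PySem.Chars.isIn ['D'] o) else option2
    String.ofList (PySem.List.pyGetD option3 0 [])

-- ===== PORT B =====
def name_alt (n : Int) (i : Int) : String :=
  if n = 0 then "OFF"
  else if i = 3 then
    if n = 50 then "DB"
    else if PySem.Int.mod n 2 = 0 ∧ 1 ≤ PySem.Int.floordiv n 2 ∧ PySem.Int.floordiv n 2 ≤ 20 then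
      String.ofList ('D' :: PySem.Int.toChars (PySem.Int.floordiv n 2))
    else ""    -- Source B raises ValueError here, excluded by Pre_
  else if n = 25 then "SB"
  else if n = 50 then "DB"
  else if 1 ≤ n ∧ n ≤ 20 then String.ofList ('S' :: PySem.Int.toChars n)
  else if PySem.Int.mod n 3 = 0 ∧ 1 ≤ PySem.Int.floordiv n 3 ∧ PySem.Int.floordiv n 3 ≤ 20 then
    String.ofList ('T' :: PySem.Int.toChars (PySem.Int.floordiv n 3))
  else if PySem.Int.mod n 2 = 0 ∧ 1 ≤ PySem.Int.floordiv n 2 ∧ PySem.Int.floordiv n 2 ≤ 20 then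
    String.ofList ('D' :: PySem.Int.toChars (PySem.Int.floordiv n 2))
  else ""    -- Source B raises ValueError here, excluded by Pre_

-- ===== PRECONDITION & SPEC =====
-- Pre_ admits exactly the inputs on which A returns normally: n must be a key of A's table
-- (0, 25, 50, a single 1..20, a double 2..40 or a triple 3..60), and when i = 3 the
-- n must have a double name (else A's 'option[0]' raises IndexError). B also raises outside Pre_.
def Pre_name (n : Int) (i : Int) : Prop :=
  (n = 0 ∨ n = 25 ∨ n = 50 ∨ (1 ≤ n ∧ n ≤ 20) ∨
    (PySem.Int.mod n 2 = 0 ∧ 2 ≤ n ∧ n ≤ 40) ∨ (PySem.Int.mod n 3 = 0 ∧ 3 ≤ n ∧ n ≤ 60)) ∧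
  (i = 3 → (n = 0 ∨ n = 50 ∨ (PySem.Int.mod n 2 = 0 ∧ 2 ≤ n ∧ n ≤ 40)))
instance (n : Int) (i : Int) : Decidable (Pre_name n i) := by unfold Pre_name; infer_instance
def pvWitness_name : Int × Int := (24, 0)

def Spec_name (n : Int) (i : Int) (out : String) : Prop := out = name_alt n i
instance (n : Int) (i : Int) (out : String) : Decidable (Spec_name n i out) := by unfold Spec_name; infer_instance

-- ===== CLAIM (what is proved, stated in full; the proofs are below) =====
def Claim_equal_name : Prop := ∀ (n : Int) (i : Int), Dom_name n i → Pre_name n i → Spec_name n i (name n i)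

-- ===== LEMMAS AND PROOFS =====
lemma name_of_ne3 (n i : Int) (h : i ≠ 3) : name n i = name n 0 := by
  unfold name
  simp only [if_neg h, if_neg (show (0:Int) ≠ 3 by decide)]

lemma name_alt_of_ne3 (n i : Int) (h : i ≠ 3) : name_alt n i = name_alt n 0 := by
  unfold name_alt
  simp only [if_neg h, if_neg (show (0:Int) ≠ 3 by decide)]

lemma pre_bounds (n i : Int) (h : Pre_name n i) : 0 ≤ n ∧ n ≤ 60 := by
  obtain ⟨hv, -⟩ := h
  rcases hv with h | h | h | h | h | h <;> omega

-- ===== VERDICT (by name: the statement is the Claim_ definition above) =====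
set_option maxRecDepth 4096 in
theorem name_spec : Claim_equal_name := by
  unfold Claim_equal_name
  intro n i _ hpre
  unfold Spec_name
  obtain ⟨h0, h60⟩ := pre_bounds n i hpre
  by_cases hi : i = 3
  · subst hi
    revert hpre
    interval_cases n <;> decide
  · rw [name_of_ne3 n i hi, name_alt_of_ne3 n i hi]
    replace hpre : Pre_name n 0 := ⟨hpre.1, by omega⟩
    revert hpre
    interval_cases n <;> decide
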